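-- pv_equiv track=rewrite | github.com/Hponky/Diseno-de-algoritmos-con-grafos | backend/generators/graph_probability.py | primera_particion
-- ===== SOURCE A (Python) =====
-- def primera_particion(resultado1):
--     div = False
--     destinos1 = []
--     origenes1 = []
--     for i in range(len(resultado1)):
--         if resultado1[i] == '|':
--             div = True
--         else:
--             if resultado1[i] != ' ' and not div:
--                 destinos1.append(resultado1[i])
--             if resultado1[i] != ' ' and div:
--                 origenes1.append(resultado1[i])
--     return destinos1, origenes1
-- ===== SOURCE B (Python) =====
-- def primera_particion(resultado1):
--     # Right-to-left sweep with a single accumulator: non-space chars collect in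
--     # `acc`; each '|' flushes acc into origenes1 (so everything right of the
--     # first '|' ends up there); what is left in acc at the end is destinos1.
--     acc = []
--     origenes1 = []
--     for c in reversed(resultado1):
--         if c == '|':
--             origenes1.extend(acc)
--             acc = []
--         elif c != ' ':
--             acc.append(c)
--     acc.reverse()
--     origenes1.reverse()
--     return acc, origenes1
-- ===== Notes on version B (the rewrite author's own statement) =====
-- stated objective: alternative
-- what changed: Replaces the forward flag-driven pass by a right-to-left sweep with a single accumulator that is flushed into origenes1 at each separator, so characters after the first separator migrate there and the residue is destinos1; no div flag and no split point computed, and avoiding per-index subscripting gives a constant-factor speedup.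
import Mathlib
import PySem

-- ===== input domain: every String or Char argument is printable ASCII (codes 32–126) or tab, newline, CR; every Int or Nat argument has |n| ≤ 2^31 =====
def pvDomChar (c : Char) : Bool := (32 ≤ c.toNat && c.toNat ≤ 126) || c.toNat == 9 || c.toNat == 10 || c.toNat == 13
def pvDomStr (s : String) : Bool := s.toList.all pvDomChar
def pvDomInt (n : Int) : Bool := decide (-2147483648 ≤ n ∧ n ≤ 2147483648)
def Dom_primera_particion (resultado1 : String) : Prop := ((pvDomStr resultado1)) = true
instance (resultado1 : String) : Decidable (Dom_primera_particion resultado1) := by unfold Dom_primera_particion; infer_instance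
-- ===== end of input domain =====

-- B replaces A's forward flag-driven pass by a right-to-left sweep whose accumulator is
-- flushed into origenes1 at every separator (alternative decomposition; return value only).

-- ===== PORT A =====
-- A iterates i over range(len(resultado1)) reading resultado1[i]; ported as the same
-- left-to-right traversal of the characters with the same (div, destinos1, origenes1) state.
def pvLoopA : List Char → Bool → List String → List String → List String × List String
  | [], _, d, o => (d, o)
  | c :: cs, div, d, o =>
    if c = '|' then pvLoopA cs true d o
    else
      pvLoopA cs div
        (if c ≠ ' ' ∧ div = false then d ++ [String.singleton c] else d)
        (if c ≠ ' ' ∧ div = true then o ++ [String.singleton c] else o)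

def primera_particion (resultado1 : String) : List String × List String :=
  pvLoopA resultado1.toList false [] []

-- ===== PORT B =====
-- B's loop over reversed(resultado1): acc collects non-space chars, '|' flushes acc into o.
def pvLoopB : List Char → List Char → List Char → List Char × List Char
  | [], acc, o => (acc, o)
  | c :: cs, acc, o =>
    if c = '|' then pvLoopB cs [] (o ++ acc)
    else if c = ' ' then pvLoopB cs acc o
    else pvLoopB cs (acc ++ [c]) o

def primera_particion_alt (resultado1 : String) : List String × List String :=
  let p := pvLoopB resultado1.toList.reverse [] []
  ((p.1.reverse).map String.singleton, (p.2.reverse).map String.singleton)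

-- ===== PRECONDITION & SPEC =====
def Spec_primera_particion (resultado1 : String) (out : List String × List String) : Prop := out = primera_particion_alt resultado1
instance (resultado1 : String) (out : List String × List String) : Decidable (Spec_primera_particion resultado1 out) := by unfold Spec_primera_particion; infer_instance

-- ===== CLAIM (what is proved, stated in full; the proofs are below) =====
def Claim_equal_primera_particion : Prop := ∀ (resultado1 : String), Dom_primera_particion resultado1 → Spec_primera_particion resultado1 (primera_particion resultado1)

-- ===== LEMMAS AND PROOFS =====
theorem pvLoopA_true (cs : List Char) (d o : List String) :
    pvLoopA cs true d o = (d, o ++ (cs.filter (fun c => c ≠ ' ' ∧ c ≠ '|')).map String.singleton) := by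
  induction cs generalizing o with
  | nil => simp [pvLoopA]
  | cons c cs ih =>
    by_cases hb : c = '|'
    · simp [pvLoopA, hb, ih]
    · by_cases hs : c = ' '
      · simp [pvLoopA, hs, ih]
      · simp [pvLoopA, hb, hs, ih]

theorem pvLoopA_false (cs : List Char) (d o : List String) :
    pvLoopA cs false d o =
      (d ++ ((cs.takeWhile (fun c => c ≠ '|')).filter (fun c => c ≠ ' ')).map String.singleton,
       o ++ (((cs.dropWhile (fun c => c ≠ '|')).drop 1).filter (fun c => c ≠ ' ' ∧ c ≠ '|')).map String.singleton) := by
  induction cs generalizing d with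
  | nil => simp [pvLoopA]
  | cons c cs ih =>
    by_cases hb : c = '|'
    · simp [pvLoopA, hb, pvLoopA_true]
    · by_cases hs : c = ' '
      · simp [pvLoopA, hs, ih, List.takeWhile, List.dropWhile]
      · simp [pvLoopA, hb, hs, ih, List.takeWhile, List.dropWhile]

theorem pvLoopB_append (r₁ r₂ acc o : List Char) :
    pvLoopB (r₁ ++ r₂) acc o =
      pvLoopB r₂ (pvLoopB r₁ acc o).1 (pvLoopB r₁ acc o).2 := by
  induction r₁ generalizing acc o with
  | nil => simp [pvLoopB]
  | cons c cs ih =>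
    by_cases hb : c = '|'
    · simp [pvLoopB, hb, ih]
    · by_cases hs : c = ' '
      · simp [pvLoopB, hs, ih]
      · simp [pvLoopB, hb, hs, ih]

-- the space-and-bar-free chars of cs are those before the first '|' (space-free) then those after it
theorem pv_flush (cs : List Char) :
    cs.filter (fun c => c ≠ ' ' ∧ c ≠ '|') =
      (cs.takeWhile (fun c => c ≠ '|')).filter (fun c => c ≠ ' ')
        ++ ((cs.dropWhile (fun c => c ≠ '|')).drop 1).filter (fun c => c ≠ ' ' ∧ c ≠ '|') := by
  induction cs with
  | nil => simp
  | cons c cs ih =>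
    by_cases hb : c = '|'
    · simp [hb, List.takeWhile, List.dropWhile]
    · by_cases hs : c = ' '
      · simp [hs, List.takeWhile, List.dropWhile]
        simpa using ih
      · simp [hb, hs, List.takeWhile, List.dropWhile]
        simpa using ih

-- closed form of B's reversed sweep, stated over the forward list t
theorem pvLoopB_closed (t : List Char) :
    pvLoopB t.reverse [] [] =
      (((t.takeWhile (fun c => c ≠ '|')).filter (fun c => c ≠ ' ')).reverse,
       (((t.dropWhile (fun c => c ≠ '|')).drop 1).filter (fun c => c ≠ ' ' ∧ c ≠ '|')).reverse) := by
  induction t with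
  | nil => simp [pvLoopB]
  | cons c cs ih =>
    rw [List.reverse_cons, pvLoopB_append, ih]
    by_cases hb : c = '|'
    · have h := pv_flush cs
      simp at h
      simp [pvLoopB, hb, List.takeWhile, List.dropWhile, h]
    · by_cases hs : c = ' '
      · simp [pvLoopB, hs, List.takeWhile, List.dropWhile]
      · simp [pvLoopB, hb, hs, List.takeWhile, List.dropWhile]

-- ===== VERDICT (by name: the statement is the Claim_ definition above) =====
theorem primera_particion_spec : Claim_equal_primera_particion := by
  intro s _
  unfold Spec_primera_particion primera_particion primera_particion_alt
  simp [pvLoopA_false, pvLoopB_closed]
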